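-- pv_equiv track=rewrite | github.com/grg909/LCtrip | Two_Pointer/LintCode.610.Two_Sum-Difference_equals_to_target.py | twoSum7
-- ===== SOURCE A (Python) =====
-- def twoSum7(nums, target):
--
--     nums.sort()
--     for left1 in range(len(nums) - 1):
--         left2 = left1 + 1
--         while left2 < len(nums):
--             dif = nums[left2] - nums[left1]
--             if dif == target:
--                 return [left1 + 1, left2 + 1]
--             elif dif < target:
--                 left2 += 1
--             else:
--                 break
-- ===== SOURCE B (Python) =====
-- def twoSum7(nums, target):
--     # Same in-place sort side effect as the original; single two-pointer pass afterwards.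
--     nums.sort()
--     n = len(nums)
--     i, j = 0, 1
--     while j < n:
--         if i == j:
--             j += 1
--             continue
--         dif = nums[j] - nums[i]
--         if dif == target:
--             return [i + 1, j + 1]
--         if dif < target:
--             j += 1
--         else:
--             i += 1
-- ===== Notes on version B (the rewrite author's own statement) =====
-- stated objective: faster
-- what changed: A's nested loops (for each left1, rescan from left1+1 until the gap exceeds target) are replaced by a single two-pointer pass over the sorted list, advancing whichever pointer the comparison dictates.
import Mathlib
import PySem

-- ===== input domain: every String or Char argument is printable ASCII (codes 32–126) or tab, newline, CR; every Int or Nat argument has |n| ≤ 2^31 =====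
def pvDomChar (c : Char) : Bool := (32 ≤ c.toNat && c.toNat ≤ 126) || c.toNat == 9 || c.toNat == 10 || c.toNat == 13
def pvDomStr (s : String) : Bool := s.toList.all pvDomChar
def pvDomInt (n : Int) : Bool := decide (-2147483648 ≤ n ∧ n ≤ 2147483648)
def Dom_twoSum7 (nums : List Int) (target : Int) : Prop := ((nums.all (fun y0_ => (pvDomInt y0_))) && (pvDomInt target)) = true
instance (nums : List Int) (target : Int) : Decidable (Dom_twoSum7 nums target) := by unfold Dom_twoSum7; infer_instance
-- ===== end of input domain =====

-- B replaces A's nested scan (for each left1, rescan from left1+1) by a single two-pointer pass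
-- over the sorted list; equivalence is about the RETURN value only — both A and B sort `nums` in place.

-- ===== PORT A =====
-- inner `while left2 < len(nums)` loop of A
def twoSum7Inner (s : List Int) (target : Int) (l1 l2 : Nat) : Option (List Int) :=
  if l2 < s.length then
    -- nums[left2] - nums[left1]; both indices are in range here, so pyGetD is exact
    let dif := PySem.List.pyGetD s (l2 : Int) 0 - PySem.List.pyGetD s (l1 : Int) 0
    if dif = target then some [(l1 : Int) + 1, (l2 : Int) + 1]
    else if dif < target then twoSum7Inner s target l1 (l2 + 1)
    else none
  else none
termination_by s.length - l2

-- outer `for left1 in range(len(nums) - 1)` loop of A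
def twoSum7Outer (s : List Int) (target : Int) (l1 : Nat) : Option (List Int) :=
  if l1 + 1 < s.length then
    match twoSum7Inner s target l1 (l1 + 1) with
    | some r => some r
    | none => twoSum7Outer s target (l1 + 1)
  else none
termination_by s.length - l1

def twoSum7 (nums : List Int) (target : Int) : Option (List Int) :=
  twoSum7Outer (PySem.List.sorted nums (fun x => x) false) target 0

-- ===== PORT B =====
-- the single `while j < n` two-pointer loop of B; fuel only makes the recursion
-- structurally total (each call consumes one unit; 2*n+2 is always enough)
def twoSum7TP (s : List Int) (target : Int) : Nat → Nat → Nat → Option (List Int)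
  | 0, _, _ => none
  | fuel + 1, i, j =>
    if j < s.length then
      if i = j then twoSum7TP s target fuel i (j + 1)
      else
        let dif := PySem.List.pyGetD s (j : Int) 0 - PySem.List.pyGetD s (i : Int) 0
        if dif = target then some [(i : Int) + 1, (j : Int) + 1]
        else if dif < target then twoSum7TP s target fuel i (j + 1)
        else twoSum7TP s target fuel (i + 1) j
    else none

def twoSum7_alt (nums : List Int) (target : Int) : Option (List Int) :=
  let s := PySem.List.sorted nums (fun x => x) false
  twoSum7TP s target (2 * s.length + 2) 0 1

-- ===== PRECONDITION & SPEC =====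
def Spec_twoSum7 (nums : List Int) (target : Int) (out : Option (List Int)) : Prop := out = twoSum7_alt nums target
instance (nums : List Int) (target : Int) (out : Option (List Int)) : Decidable (Spec_twoSum7 nums target out) := by unfold Spec_twoSum7; infer_instance

-- ===== CLAIM (what is proved, stated in full; the proofs are below) =====
def Claim_equal_twoSum7 : Prop := ∀ (nums : List Int) (target : Int), Dom_twoSum7 nums target → Spec_twoSum7 nums target (twoSum7 nums target)

-- ===== LEMMAS AND PROOFS =====

-- A's inner scan may start at any point j0 past which every gap is still < target
theorem inner_skip (s : List Int) (target : Int) :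
    ∀ (d l1 j0 : Nat), j0 + d ≤ s.length →
      (∀ k, j0 ≤ k → k < j0 + d →
        PySem.List.pyGetD s (k : Int) 0 - PySem.List.pyGetD s (l1 : Int) 0 < target) →
      twoSum7Inner s target l1 j0 = twoSum7Inner s target l1 (j0 + d) := by
  intro d
  induction d with
  | zero => intro l1 j0 _ _; rfl
  | succ d ih =>
    intro l1 j0 hle h
    have hj0 : j0 < s.length := by omega
    have hdif := h j0 (le_refl _) (by omega)
    rw [twoSum7Inner]
    simp only [hj0, if_pos]
    rw [if_neg (by omega), if_pos (by omega)]
    have := ih l1 (j0 + 1) (by omega) (by intro k hk1 hk2; exact h k (by omega) (by omega))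
    rw [this]
    congr 1
    omega

-- if every gap from l1 to the right is < target, A's inner scan finds nothing
theorem inner_none (s : List Int) (target : Int) (l1 j0 : Nat) (hj : j0 ≤ s.length)
    (h : ∀ k, j0 ≤ k → k < s.length →
      PySem.List.pyGetD s (k : Int) 0 - PySem.List.pyGetD s (l1 : Int) 0 < target) :
    twoSum7Inner s target l1 j0 = none := by
  have := inner_skip s target (s.length - j0) l1 j0 (by omega)
    (by intro k hk1 hk2; exact h k hk1 (by omega))
  rw [this]
  have : j0 + (s.length - j0) = s.length := by omega
  rw [this, twoSum7Inner]
  simp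

-- if from position i on no gap reaches target, A's remaining outer iterations all fail
theorem outer_none (s : List Int) (target : Int)
    (mono : ∀ p q : Nat, p ≤ q → q < s.length →
      PySem.List.pyGetD s (p : Int) 0 ≤ PySem.List.pyGetD s (q : Int) 0)
    (i : Nat)
    (h : ∀ k, i < k → k < s.length →
      PySem.List.pyGetD s (k : Int) 0 - PySem.List.pyGetD s (i : Int) 0 < target) :
    ∀ (m i' : Nat), s.length - i' ≤ m → i ≤ i' → twoSum7Outer s target i' = none := by
  intro m
  induction m with
  | zero =>
    intro i' hm _
    rw [twoSum7Outer, if_neg (by omega)]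
  | succ m ih =>
    intro i' hm hii'
    rw [twoSum7Outer]
    by_cases hlt : i' + 1 < s.length
    · have hsi : PySem.List.pyGetD s (i : Int) 0 ≤ PySem.List.pyGetD s (i' : Int) 0 :=
        mono i i' hii' (by omega)
      have hnone : twoSum7Inner s target i' (i' + 1) = none := by
        apply inner_none s target i' (i' + 1) (by omega)
        intro k hk1 hk2
        have := h k (by omega) hk2
        omega
      rw [if_pos hlt, hnone]
      exact ih (i' + 1) (by omega) (by omega)
    · rw [if_neg hlt]

-- the two-pointer state (i, j) computes exactly A's remaining outer loop from i
theorem tp_eq_outer (s : List Int) (target : Int)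
    (mono : ∀ p q : Nat, p ≤ q → q < s.length →
      PySem.List.pyGetD s (p : Int) 0 ≤ PySem.List.pyGetD s (q : Int) 0) :
    ∀ (fuel i j : Nat), i ≤ j → j ≤ s.length → (s.length - i) + (s.length - j) < fuel →
      (∀ k, i < k → k < j →
        PySem.List.pyGetD s (k : Int) 0 - PySem.List.pyGetD s (i : Int) 0 < target) →
      twoSum7TP s target fuel i j = twoSum7Outer s target i := by
  intro fuel
  induction fuel with
  | zero => intro i j _ _ hm _; omega
  | succ fuel ih =>
    intro i j hij hjn hm hinv
    rw [twoSum7TP]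
    by_cases hjlt : j < s.length
    · rw [if_pos hjlt]
      by_cases heq : i = j
      · rw [if_pos heq]
        exact ih i (j + 1) (by omega) (by omega) (by omega)
          (by intro k hk1 hk2; omega)
      · rw [if_neg heq]
        have hij' : i < j := by omega
        have hi1n : i + 1 ≤ j := by omega
        have hskip : twoSum7Inner s target i (i + 1) = twoSum7Inner s target i j := by
          have := inner_skip s target (j - (i + 1)) i (i + 1) (by omega)
            (by intro k hk1 hk2; exact hinv k (by omega) (by omega))
          rw [this]
          congr 1
          omega
        set dif := PySem.List.pyGetD s (j : Int) 0 - PySem.List.pyGetD s (i : Int) 0 with hdif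
        by_cases h1 : dif = target
        · rw [if_pos h1]
          rw [twoSum7Outer, if_pos (by omega), hskip, twoSum7Inner, if_pos hjlt]
          rw [if_pos (by rw [← hdif]; exact h1)]
        · rw [if_neg h1]
          by_cases h2 : dif < target
          · rw [if_pos h2]
            rw [ih i (j + 1) (by omega) (by omega) (by omega)
              (by intro k hk1 hk2
                  by_cases hkj : k = j
                  · subst hkj; exact h2
                  · exact hinv k hk1 (by omega))]
          · rw [if_neg h2]
            have hinner : twoSum7Inner s target i j = none := by
              rw [twoSum7Inner, if_pos hjlt, if_neg (by rw [← hdif]; exact h1),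
                if_neg (by rw [← hdif]; exact h2)]
            have houter : twoSum7Outer s target i = twoSum7Outer s target (i + 1) := by
              rw [twoSum7Outer, if_pos (by omega), hskip, hinner]
            rw [houter]
            apply ih (i + 1) j hi1n hjn (by omega)
            intro k hk1 hk2
            have hmono : PySem.List.pyGetD s (i : Int) 0 ≤ PySem.List.pyGetD s ((i + 1 : Nat) : Int) 0 :=
              mono i (i + 1) (by omega) (by omega)
            have := hinv k (by omega) hk2
            omega
    · rw [if_neg hjlt]
      have hjeq : j = s.length := by omega
      exact (outer_none s target mono i
        (by intro k hk1 hk2; exact hinv k hk1 (by omega)) s.length i (by omega) (le_refl _)).symm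

-- ===== VERDICT (by name: the statement is the Claim_ definition above) =====
theorem twoSum7_spec : Claim_equal_twoSum7 := by
  intro nums target _
  unfold Spec_twoSum7 twoSum7 twoSum7_alt
  set s := PySem.List.sorted nums (fun x => x) false with hs
  have mono : ∀ p q : Nat, p ≤ q → q < s.length →
      PySem.List.pyGetD s (p : Int) 0 ≤ PySem.List.pyGetD s (q : Int) 0 := by
    intro p q hpq hq
    have hp : p < s.length := lt_of_le_of_lt hpq hq
    simp only [PySem.List.pyGetD_natCast]
    rw [List.getD_eq_getElem _ _ hp, List.getD_eq_getElem _ _ hq]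
    exact PySem.List.sorted_id_getElem_mono nums hpq hq
  by_cases hn : s.length = 0
  · rw [twoSum7Outer]
    simp [twoSum7TP, hn]
  · exact (tp_eq_outer s target mono (2 * s.length + 2) 0 1 (by omega) (by omega) (by omega)
      (by intro k hk1 hk2; omega)).symm
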